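-- pv_equiv track=rewrite | github.com/joshanashakya/dissertation | workspace/dataset/java-python/GeeksForGeeks/2411/A/2.py | calculateEvenSum
-- ===== SOURCE A (Python) =====
-- def calculateEvenSum(n) :
--
--     if n <= 0 :
--         return 0
--
--     fibo = [0] * (2 * n + 1)
--     fibo[0] , fibo[1] = 0 , 1
--
--     # Initialize result
--     sum = 0
--
--     # Add remaining terms
--     for i in range(2, 2 * n + 1) :
--
--         fibo[i] = fibo[i - 1] + fibo[i - 2]
--
--         # For even indices
--         if i % 2 == 0 :
--             sum += fibo[i]
--
--     # Return the alternting sum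
--     return sum
-- ===== SOURCE B (Python) =====
-- def calculateEvenSum(n):
--     if n <= 0:
--         return 0
--
--     def fib_pair(k):
--         # fast doubling: returns (F(k), F(k+1))
--         if k == 0:
--             return (0, 1)
--         a, b = fib_pair(k >> 1)
--         c = a * (2 * b - a)
--         d = a * a + b * b
--         if k & 1:
--             return (d, c + d)
--         return (c, d)
--
--     # F(2) + F(4) + ... + F(2n) = F(2n+1) - 1
--     return fib_pair(2 * n + 1)[0] - 1
-- ===== Notes on version B (the rewrite author's own statement) =====
-- stated objective: faster
-- what changed: Replaces the O(n) table-building Fibonacci loop by the closed form F(2)+...+F(2n) = F(2n+1)-1 computed with fast-doubling Fibonacci in O(log n).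
import Mathlib
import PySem

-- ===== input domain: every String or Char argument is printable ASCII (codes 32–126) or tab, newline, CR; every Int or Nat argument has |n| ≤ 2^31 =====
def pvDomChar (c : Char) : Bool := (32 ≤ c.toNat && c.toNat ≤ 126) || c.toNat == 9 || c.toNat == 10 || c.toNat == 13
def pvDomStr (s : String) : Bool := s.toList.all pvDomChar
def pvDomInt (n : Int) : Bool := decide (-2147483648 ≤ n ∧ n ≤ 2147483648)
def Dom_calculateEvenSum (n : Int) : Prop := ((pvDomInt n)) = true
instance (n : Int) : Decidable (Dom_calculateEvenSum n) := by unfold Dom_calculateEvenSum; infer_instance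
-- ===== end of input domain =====

-- B replaces A's O(n) Fibonacci table loop with the closed form F(2n+1)-1 via fast-doubling Fibonacci.

-- ===== PORT A =====
def calculateEvenSum (n : Int) : Int :=
  if n ≤ 0 then 0
  else
    let fibo : List Int := List.replicate (2 * n + 1).toNat 0
    let fibo := PySem.List.pySetD fibo 0 0
    let fibo := PySem.List.pySetD fibo 1 1
    let res := (PySem.List.pyRange 2 (2 * n + 1) 1).foldl
      (fun (st : List Int × Int) i =>
        let fibo' := PySem.List.pySetD st.1 i
          (PySem.List.pyGetD st.1 (i - 1) 0 + PySem.List.pyGetD st.1 (i - 2) 0)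
        (fibo', if PySem.Int.mod i 2 == 0 then st.2 + PySem.List.pyGetD fibo' i 0 else st.2))
      (fibo, 0)
    res.2

-- ===== PORT B =====
-- fast doubling: fibPair k = (F(k), F(k+1))
def fibPair (k : Nat) : Int × Int :=
  if k = 0 then (0, 1)
  else
    let p := fibPair (k / 2)
    let c := p.1 * (2 * p.2 - p.1)
    let d := p.1 * p.1 + p.2 * p.2
    if k % 2 = 1 then (d, c + d) else (c, d)
decreasing_by exact Nat.div_lt_self (Nat.pos_of_ne_zero (by assumption)) (by omega)

def calculateEvenSum_alt (n : Int) : Int :=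
  if n ≤ 0 then 0
  else (fibPair (2 * n + 1).toNat).1 - 1

-- ===== PRECONDITION & SPEC =====
def Spec_calculateEvenSum (n : Int) (out : Int) : Prop := out = calculateEvenSum_alt n
instance (n : Int) (out : Int) : Decidable (Spec_calculateEvenSum n out) := by unfold Spec_calculateEvenSum; infer_instance

-- ===== CLAIM (what is proved, stated in full; the proofs are below) =====
def Claim_equal_calculateEvenSum : Prop := ∀ (n : Int), Dom_calculateEvenSum n → Spec_calculateEvenSum n (calculateEvenSum n)

-- ===== LEMMAS AND PROOFS =====

-- fast-doubling correctness
theorem fibPair_eq (k : Nat) : fibPair k = ((Nat.fib k : Int), (Nat.fib (k + 1) : Int)) := by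
  induction k using Nat.strong_induction_on with
  | _ k ih =>
    rw [fibPair]
    by_cases h0 : k = 0
    · simp [h0]
    · have ihk := ih (k / 2) (Nat.div_lt_self (Nat.pos_of_ne_zero h0) (by omega))
      simp only [h0, if_false, ihk]
      have hmono : Nat.fib (k / 2) ≤ 2 * Nat.fib (k / 2 + 1) := by
        have := Nat.fib_le_fib_succ (n := k / 2); omega
      have h2m : (Nat.fib (2 * (k / 2)) : Int) =
          (Nat.fib (k / 2) : Int) * (2 * (Nat.fib (k / 2 + 1) : Int) - (Nat.fib (k / 2) : Int)) := by
        rw [Nat.fib_two_mul]; push_cast [hmono]; ring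
      have h2m1 : (Nat.fib (2 * (k / 2) + 1) : Int) =
          (Nat.fib (k / 2) : Int) * (Nat.fib (k / 2) : Int) +
          (Nat.fib (k / 2 + 1) : Int) * (Nat.fib (k / 2 + 1) : Int) := by
        rw [Nat.fib_two_mul_add_one]; push_cast; ring
      rcases Nat.even_or_odd k with he | ho
      · obtain ⟨m, hk⟩ : ∃ m, k = 2 * m := by rcases he with ⟨m, hm⟩; exact ⟨m, by omega⟩
        have hq : k / 2 = m := by omega
        have hm1 : ¬ k % 2 = 1 := by omega
        rw [hq] at h2m h2m1
        simp only [hq, hm1, if_false]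
        rw [hk]
        exact Prod.ext h2m.symm h2m1.symm
      · obtain ⟨m, hk⟩ := ho
        have hq : k / 2 = m := by omega
        have hm1 : k % 2 = 1 := by omega
        rw [hq] at h2m h2m1
        simp only [hq, hm1, if_true]
        rw [hk]
        refine Prod.ext h2m1.symm ?_
        have hsum : (Nat.fib (2 * m + 1 + 1) : Int)
            = (Nat.fib (2 * m) : Int) + (Nat.fib (2 * m + 1) : Int) := by
          have h := Nat.fib_add_two (n := 2 * m)
          rw [show 2 * m + 1 + 1 = 2 * m + 2 from rfl, h]; push_cast; ring
        rw [hsum, h2m, h2m1]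

-- the idealised table after all entries up to index k have been filled
def fibListN (N k : Nat) : List Int :=
  (List.range N).map (fun j => if j ≤ k then (Nat.fib j : Int) else 0)

theorem getD_fibListN (N k j : Nat) (h : j < N) (d : Int) :
    (fibListN N k).getD j d = if j ≤ k then (Nat.fib j : Int) else 0 := by
  simp [fibListN, List.getD_eq_getElem?_getD, h]

theorem set_fibListN (N k : Nat) (h : k + 1 < N) :
    (fibListN N k).set (k + 1) ((Nat.fib (k + 1) : Int)) = fibListN N (k + 1) := by
  apply List.ext_getElem
  · simp [fibListN]
  · intro j hj hj2
    simp only [fibListN, List.getElem_set, List.getElem_map, List.getElem_range]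
    split_ifs with h1 h2 h3 <;> first | rfl | (subst h1; rfl) | omega

-- the loop state after K steps
theorem loopA_inv (N : Nat) (hN : 3 ≤ N) (K : Nat) (hK : K + 2 ≤ N) :
    ((List.range K).map (fun j : Nat => ((2 + j : Nat) : Int))).foldl
      (fun (st : List Int × Int) i =>
        let fibo' := PySem.List.pySetD st.1 i
          (PySem.List.pyGetD st.1 (i - 1) 0 + PySem.List.pyGetD st.1 (i - 2) 0)
        (fibo', if PySem.Int.mod i 2 == 0 then st.2 + PySem.List.pyGetD fibo' i 0 else st.2))
      (fibListN N 1, 0)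
    = (fibListN N (K + 1), (Nat.fib (2 * ((K + 1) / 2) + 1) : Int) - 1) := by
  induction K with
  | zero => simp
  | succ K ih =>
    have hK' : K + 2 ≤ N := by omega
    rw [List.range_succ, List.map_append, List.foldl_append, ih hK']
    simp only [List.map_cons, List.map_nil, List.foldl_cons, List.foldl_nil]
    have hidx : (((2 + K : Nat) : Int)) = ((K + 2 : Nat) : Int) := by push_cast; ring
    have hidx1 : ((2 + K : Nat) : Int) - 1 = ((K + 1 : Nat) : Int) := by push_cast; ring
    have hidx2 : ((2 + K : Nat) : Int) - 2 = ((K : Nat) : Int) := by push_cast; ring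
    have hlt : K + 2 < N := by omega
    have hget1 : PySem.List.pyGetD (fibListN N (K + 1)) (((2 + K : Nat) : Int) - 1) 0
        = (Nat.fib (K + 1) : Int) := by
      rw [hidx1, PySem.List.pyGetD_natCast, getD_fibListN _ _ _ (by omega)]
      simp
    have hget2 : PySem.List.pyGetD (fibListN N (K + 1)) (((2 + K : Nat) : Int) - 2) 0
        = (Nat.fib K : Int) := by
      rw [hidx2, PySem.List.pyGetD_natCast, getD_fibListN _ _ _ (by omega)]
      simp
    have hsum : (Nat.fib (K + 1) : Int) + (Nat.fib K : Int) = (Nat.fib (K + 2) : Int) := by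
      rw [Nat.fib_add_two]; push_cast; ring
    have hset : PySem.List.pySetD (fibListN N (K + 1)) ((2 + K : Nat) : Int)
          (PySem.List.pyGetD (fibListN N (K + 1)) (((2 + K : Nat) : Int) - 1) 0 +
           PySem.List.pyGetD (fibListN N (K + 1)) (((2 + K : Nat) : Int) - 2) 0)
        = fibListN N (K + 2) := by
      rw [hget1, hget2, hsum, hidx, PySem.List.pySetD_natCast]
      exact set_fibListN N (K + 1) (by omega)
    simp only [hset]
    have hgetNew : PySem.List.pyGetD (fibListN N (K + 2)) ((2 + K : Nat) : Int) 0
        = (Nat.fib (K + 2) : Int) := by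
      rw [hidx, PySem.List.pyGetD_natCast, getD_fibListN _ _ _ (by omega)]
      simp
    have hmod : PySem.Int.mod ((2 + K : Nat) : Int) 2 = ((K % 2 : Nat) : Int) := by
      rw [PySem.Int.mod_eq_emod_of_pos (by omega)]
      omega
    rcases Nat.mod_two_eq_zero_or_one K with hm2 | hm2
    · have : (PySem.Int.mod ((2 + K : Nat) : Int) 2 == 0) = true := by
        rw [hmod, hm2]; simp
      simp only [this, if_true, hgetNew]
      refine Prod.ext rfl ?_
      have e1 : 2 * ((K + 1) / 2) + 1 = K + 1 := by omega
      have e2 : 2 * ((K + 1 + 1) / 2) + 1 = K + 3 := by omega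
      simp only [e1, e2]
      have : (Nat.fib (K + 3) : Int) = (Nat.fib (K + 1) : Int) + (Nat.fib (K + 2) : Int) := by
        rw [show K + 3 = (K + 1) + 2 from rfl, Nat.fib_add_two]; push_cast; ring
      rw [this]; ring
    · have : (PySem.Int.mod ((2 + K : Nat) : Int) 2 == 0) = false := by
        rw [hmod, hm2]; simp
      simp only [this, Bool.false_eq_true, if_false]
      refine Prod.ext rfl ?_
      have e : (K + 1) / 2 = (K + 1 + 1) / 2 := by omega
      rw [e]

-- the initial two assignments build fibListN N 1
theorem init_fibListN (N : Nat) (hN : 3 ≤ N) :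
    PySem.List.pySetD (PySem.List.pySetD (List.replicate N (0 : Int)) 0 0) 1 1
      = fibListN N 1 := by
  rw [show (0 : Int) = ((0 : Nat) : Int) from rfl] ; rw [PySem.List.pySetD_natCast]
  rw [show (1 : Int) = ((1 : Nat) : Int) from rfl] ; rw [PySem.List.pySetD_natCast]
  apply List.ext_getElem
  · simp [fibListN]
  · intro j hj hj2
    simp only [List.length_set, List.length_replicate] at hj
    simp only [List.getElem_set, List.getElem_replicate, fibListN, List.getElem_map,
      List.getElem_range]
    rcases j with _ | _ | j <;> simp [Nat.fib]

-- ===== VERDICT (by name: the statement is the Claim_ definition above) =====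
theorem calculateEvenSum_spec : Claim_equal_calculateEvenSum := by
  intro n _
  unfold Spec_calculateEvenSum calculateEvenSum calculateEvenSum_alt
  by_cases hn : n ≤ 0
  · simp [hn]
  · simp only [hn, if_false]
    have hn1 : 1 ≤ n := by omega
    obtain ⟨m, hmn⟩ : ∃ m : Nat, (m : Int) = n := ⟨n.toNat, Int.toNat_of_nonneg (by omega)⟩
    have hm1 : 1 ≤ m := by omega
    have hNnat : (2 * n + 1).toNat = 2 * m + 1 := by omega
    have hN3 : 3 ≤ 2 * m + 1 := by omega
    have hrange : PySem.List.pyRange 2 (2 * n + 1) 1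
        = (List.range (2 * m - 1)).map (fun j : Nat => ((2 + j : Nat) : Int)) := by
      rw [PySem.List.pyRange_one]
      rw [show (2 * n + 1 - 2).toNat = 2 * m - 1 by omega]
      apply List.map_congr_left
      intro a _
      push_cast
      ring
    rw [hrange, hNnat]
    rw [init_fibListN (2 * m + 1) hN3]
    rw [loopA_inv (2 * m + 1) hN3 (2 * m - 1) (by omega)]
    rw [fibPair_eq]
    have e : 2 * ((2 * m - 1 + 1) / 2) + 1 = 2 * m + 1 := by omega
    rw [e]
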